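-- pv_equiv track=rewrite | github.com/bisssultan/PP2_2025Fall | Lab_3/task_8f.py | contains_007
-- ===== SOURCE A (Python) =====
-- def contains_007(nums):
--     sequence = [0, 0, 7]
--     index = 0
--     for num in nums:
--         if num == sequence[index]:
--             index += 1
--         if index == len(sequence):
--             return True
--
--     return False
-- ===== SOURCE B (Python) =====
-- def contains_007(nums):
--     data = list(nums)
--     try:
--         i = data.index(0)
--         j = data.index(0, i + 1)
--         data.index(7, j + 1)
--         return True
--     except ValueError:
--         return False
-- ===== Notes on version B (the rewrite author's own statement) =====
-- stated objective: alternative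
-- what changed: Replaces A's single pass with an inline state-machine pointer over the three-element pattern by three sequential list.index searches (each starting just after the previous match) guarded by try/except.
import Mathlib
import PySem

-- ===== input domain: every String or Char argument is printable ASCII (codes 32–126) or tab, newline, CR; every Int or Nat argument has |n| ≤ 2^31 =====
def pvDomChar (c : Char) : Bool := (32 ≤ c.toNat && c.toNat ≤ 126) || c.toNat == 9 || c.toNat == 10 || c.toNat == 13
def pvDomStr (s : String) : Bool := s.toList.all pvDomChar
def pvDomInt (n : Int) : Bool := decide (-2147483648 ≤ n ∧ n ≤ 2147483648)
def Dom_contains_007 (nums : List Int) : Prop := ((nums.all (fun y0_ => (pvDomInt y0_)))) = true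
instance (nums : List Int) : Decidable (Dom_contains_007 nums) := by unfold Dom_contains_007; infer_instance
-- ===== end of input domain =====

-- B replaces A's inline pattern-pointer pass by three sequential index searches; objective: alternative decomposition.


-- ===== PORT A =====
-- A's for-loop over nums with the mutable pattern pointer `index`; sequence = [0, 0, 7].
def contains007Loop : List Int → Int → Bool
  | [], _ => false
  | num :: rest, index =>
    let index := if some num == PySem.List.pyGet? ([0, 0, 7] : List Int) index then index + 1 else index
    if index == (3 : Int) then true else contains007Loop rest index

def contains_007 (nums : List Int) : Bool := contains007Loop nums 0

-- ===== PORT B =====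
-- data.index(x, start) is ported as index? on data.drop start with the start offset added back;
-- the try/except ValueError becomes the none branches.
def contains_007_alt (nums : List Int) : Bool :=
  let data := nums
  match PySem.List.index? data 0 with
  | none => false
  | some i =>
    match (PySem.List.index? (data.drop (i + 1)) 0).map (· + (i + 1)) with
    | none => false
    | some j => (PySem.List.index? (data.drop (j + 1)) 7).isSome

-- ===== PRECONDITION & SPEC =====
def Spec_contains_007 (nums : List Int) (out : Bool) : Prop := out = contains_007_alt nums
instance (nums : List Int) (out : Bool) : Decidable (Spec_contains_007 nums out) := by unfold Spec_contains_007; infer_instance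

-- ===== CLAIM (what is proved, stated in full; the proofs are below) =====
def Claim_equal_contains_007 : Prop := ∀ (nums : List Int), Dom_contains_007 nums → Spec_contains_007 nums (contains_007 nums)

-- ===== LEMMAS AND PROOFS =====
theorem loop2_eq (nums : List Int) :
    contains007Loop nums 2 = (PySem.List.index? nums 7).isSome := by
  induction nums with
  | nil => simp [contains007Loop, PySem.List.index?_eq_idxOf?, List.idxOf?]
  | cons num rest ih =>
    by_cases h : num = 7
    · subst h
      rw [PySem.List.index?_cons_self]
      simp [contains007Loop, PySem.List.pyGet?, PySem.List.pyIdx?]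
    · rw [PySem.List.index?_cons_of_ne rest h]
      simp only [contains007Loop]
      have hg : (some num == PySem.List.pyGet? ([0, 0, 7] : List Int) 2) = false := by
        simp [PySem.List.pyGet?, PySem.List.pyIdx?, h]
      rw [hg]
      simp only [Bool.false_eq_true, if_false]
      rw [ih]
      simp

theorem loop1_eq (nums : List Int) :
    contains007Loop nums 1 =
      (match PySem.List.index? nums 0 with
       | none => false
       | some j => contains007Loop (nums.drop (j + 1)) 2) := by
  induction nums with
  | nil => simp [contains007Loop, PySem.List.index?_eq_idxOf?, List.idxOf?]
  | cons num rest ih =>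
    by_cases h : num = 0
    · subst h
      rw [PySem.List.index?_cons_self]
      simp [contains007Loop, PySem.List.pyGet?, PySem.List.pyIdx?]
    · rw [PySem.List.index?_cons_of_ne rest h]
      simp only [contains007Loop]
      have hg : (some num == PySem.List.pyGet? ([0, 0, 7] : List Int) 1) = false := by
        simp [PySem.List.pyGet?, PySem.List.pyIdx?, h]
      rw [hg]
      simp only [Bool.false_eq_true, if_false]
      rw [ih]
      cases PySem.List.index? rest 0 with
      | none => rfl
      | some j => rfl

theorem loop0_eq (nums : List Int) :
    contains007Loop nums 0 =
      (match PySem.List.index? nums 0 with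
       | none => false
       | some i => contains007Loop (nums.drop (i + 1)) 1) := by
  induction nums with
  | nil => simp [contains007Loop, PySem.List.index?_eq_idxOf?, List.idxOf?]
  | cons num rest ih =>
    by_cases h : num = 0
    · subst h
      rw [PySem.List.index?_cons_self]
      simp [contains007Loop, PySem.List.pyGet?, PySem.List.pyIdx?]
    · rw [PySem.List.index?_cons_of_ne rest h]
      simp only [contains007Loop]
      have hg : (some num == PySem.List.pyGet? ([0, 0, 7] : List Int) 0) = false := by
        simp [PySem.List.pyGet?, PySem.List.pyIdx?, h]
      rw [hg]
      simp only [Bool.false_eq_true, if_false]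
      rw [ih]
      cases PySem.List.index? rest 0 with
      | none => rfl
      | some i => rfl

-- ===== VERDICT (by name: the statement is the Claim_ definition above) =====
theorem contains_007_spec : Claim_equal_contains_007 := by
  intro nums _
  unfold Spec_contains_007 contains_007 contains_007_alt
  rw [loop0_eq]
  cases hi : PySem.List.index? nums 0 with
  | none => rw [PySem.List.index?_eq_idxOf?] at hi; simp [hi]
  | some i =>
    rw [PySem.List.index?_eq_idxOf?] at hi
    simp only [PySem.List.index?_eq_idxOf?, hi]
    rw [loop1_eq]
    cases hj : PySem.List.index? (nums.drop (i + 1)) 0 with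
    | none => rw [PySem.List.index?_eq_idxOf?] at hj; simp [hj]
    | some j =>
      rw [PySem.List.index?_eq_idxOf?] at hj
      simp only [PySem.List.index?_eq_idxOf?, hj, Option.map_some]
      rw [loop2_eq]
      have hd : (nums.drop (i + 1)).drop (j + 1) = nums.drop (j + (i + 1) + 1) := by
        rw [List.drop_drop]; congr 1; omega
      rw [hd]
      simp [PySem.List.index?_eq_idxOf?]
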